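-- pv_equiv track=rewrite | github.com/glbala87/IRIS | src/iris/differential_transcript_usage.py | build_gene_groups
-- ===== SOURCE A (Python) =====
-- def build_gene_groups(transcript_names, gene_map, min_isoforms=2):
--     """Group transcript indices by gene and filter by isoform count.
--
--     :param transcript_names: array-like of transcript names from the matrix.
--     :param gene_map: dict mapping transcript_id to gene_id.
--     :param min_isoforms: minimum number of transcripts per gene.
--     :returns: dict of gene_id -> list of transcript indices.
--     """
--     gene_groups = {}
--     for idx, tx_name in enumerate(transcript_names):
--         gene_id = gene_map.get(tx_name)
--         if gene_id is not None:
--             gene_groups.setdefault(gene_id, []).append(idx)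
--
--     # Filter to genes with enough isoforms
--     filtered = {
--         gene: indices for gene, indices in gene_groups.items()
--         if len(indices) >= min_isoforms
--     }
--     return filtered
-- ===== SOURCE B (Python) =====
-- def build_gene_groups(transcript_names, gene_map, min_isoforms=2):
--     """Count-first re-implementation: one counting pass, then build only the
--     qualifying groups inline (no intermediate full grouping dict, no post-filter)."""
--     counts = {}
--     for name in transcript_names:
--         gene_id = gene_map.get(name)
--         if gene_id is not None:
--             counts[gene_id] = counts.get(gene_id, 0) + 1
--     result = {}
--     for idx, name in enumerate(transcript_names):
--         gene_id = gene_map.get(name)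
--         if gene_id is not None and counts[gene_id] >= min_isoforms:
--             result.setdefault(gene_id, []).append(idx)
--     return result
-- ===== Notes on version B (the rewrite author's own statement) =====
-- stated objective: alternative
-- what changed: Instead of building a full gene->indices grouping dict and then post-filtering it by group size, B first makes a counting pass over transcript_names (a plain count table) and then a second pass that appends indices only for genes whose total count meets min_isoforms, so no intermediate full grouping or post-filter exists.
import Mathlib
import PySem

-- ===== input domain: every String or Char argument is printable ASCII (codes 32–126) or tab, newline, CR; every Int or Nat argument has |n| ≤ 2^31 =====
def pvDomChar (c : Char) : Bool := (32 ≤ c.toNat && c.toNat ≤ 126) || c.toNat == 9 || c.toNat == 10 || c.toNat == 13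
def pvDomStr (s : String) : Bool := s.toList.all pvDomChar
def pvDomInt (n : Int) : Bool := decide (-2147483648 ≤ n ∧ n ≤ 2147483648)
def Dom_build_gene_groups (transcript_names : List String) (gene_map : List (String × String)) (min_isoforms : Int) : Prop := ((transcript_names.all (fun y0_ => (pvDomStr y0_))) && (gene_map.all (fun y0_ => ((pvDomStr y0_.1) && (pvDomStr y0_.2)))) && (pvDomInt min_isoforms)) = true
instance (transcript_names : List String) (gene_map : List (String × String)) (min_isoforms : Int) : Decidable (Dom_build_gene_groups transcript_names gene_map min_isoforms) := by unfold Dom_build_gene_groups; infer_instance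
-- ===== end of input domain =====

-- B replaces A's "group everything, then post-filter" with a counting pass followed by
-- building only the qualifying groups inline (same cost; alternative decomposition).


-- ===== PORT A =====
-- Loop: gene_groups.setdefault(gene_id, []).append(idx)  ==  gene_groups[g] = gene_groups.get(g, []) + [idx]  ==  Dict.modify.
-- The final dict comprehension re-inserts the (distinct-keyed) items in order, i.e. filters the items list.
def pvA_groups (gm : PySem.Dict String String) (tn : List String) : PySem.Dict String (List Int) :=
  (PySem.List.enumerate tn 0).foldl (fun d p =>
    match gm.get? p.2 with
    | none => d
    | some g => d.modify g ([] : List Int) (· ++ [p.1])) PySem.Dict.empty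

def build_gene_groups (transcript_names : List String) (gene_map : List (String × String)) (min_isoforms : Int) : List (String × List Int) :=
  ((pvA_groups (PySem.Dict.ofList gene_map) transcript_names).items.filter
    (fun p => (p.2.length : Int) ≥ min_isoforms))

-- ===== PORT B =====
def pvB_counts (gm : PySem.Dict String String) (tn : List String) : PySem.Dict String Int :=
  tn.foldl (fun c name =>
    match gm.get? name with
    | none => c
    | some g => c.insert g (c.getD g 0 + 1)) PySem.Dict.empty

-- counts[gene_id]: the key is always present here; getD is exact
def pvB_result (gm : PySem.Dict String String) (counts : PySem.Dict String Int) (mi : Int) (tn : List String) : PySem.Dict String (List Int) :=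
  (PySem.List.enumerate tn 0).foldl (fun d p =>
    match gm.get? p.2 with
    | none => d
    | some g =>
      if counts.getD g 0 ≥ mi then d.modify g ([] : List Int) (· ++ [p.1]) else d) PySem.Dict.empty

def build_gene_groups_alt (transcript_names : List String) (gene_map : List (String × String)) (min_isoforms : Int) : List (String × List Int) :=
  (pvB_result (PySem.Dict.ofList gene_map)
    (pvB_counts (PySem.Dict.ofList gene_map) transcript_names) min_isoforms transcript_names).items
-- ===== PRECONDITION & SPEC =====
def Spec_build_gene_groups (transcript_names : List String) (gene_map : List (String × String)) (min_isoforms : Int) (out : List (String × List Int)) : Prop := out = build_gene_groups_alt transcript_names gene_map min_isoforms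
instance (transcript_names : List String) (gene_map : List (String × String)) (min_isoforms : Int) (out : List (String × List Int)) : Decidable (Spec_build_gene_groups transcript_names gene_map min_isoforms out) := by unfold Spec_build_gene_groups; infer_instance

-- ===== CLAIM (what is proved, stated in full; the proofs are below) =====
def Claim_equal_build_gene_groups : Prop := ∀ (transcript_names : List String) (gene_map : List (String × String)) (min_isoforms : Int), Dom_build_gene_groups transcript_names gene_map min_isoforms → Spec_build_gene_groups transcript_names gene_map min_isoforms (build_gene_groups transcript_names gene_map min_isoforms)

-- ===== LEMMAS AND PROOFS =====

-- the grouping fold both ports perform, over a list of (gene, index) pairs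
def pvGrp (l : List (String × Int)) : PySem.Dict String (List Int) :=
  l.foldl (fun d q => d.modify q.1 ([] : List Int) (· ++ [q.2])) PySem.Dict.empty

-- the (gene, index) pairs actually processed
def pvPairs (gm : PySem.Dict String String) (l : List (Int × String)) : List (String × Int) :=
  l.filterMap (fun p => (gm.get? p.2).map (fun g => (g, p.1)))

lemma pvFoldA (gm : PySem.Dict String String) (l : List (Int × String))
    (d : PySem.Dict String (List Int)) :
    l.foldl (fun d p =>
      match gm.get? p.2 with
      | none => d
      | some g => d.modify g ([] : List Int) (· ++ [p.1])) d
    = (pvPairs gm l).foldl (fun d q => d.modify q.1 ([] : List Int) (· ++ [q.2])) d := by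
  induction l generalizing d with
  | nil => rfl
  | cons p rest ih =>
    simp only [pvPairs, List.foldl_cons, List.filterMap_cons]
    cases h : gm.get? p.2 <;> simp [ih, pvPairs]

lemma pvFoldB (gm : PySem.Dict String String) (counts : PySem.Dict String Int) (mi : Int)
    (l : List (Int × String)) (d : PySem.Dict String (List Int)) :
    l.foldl (fun d p =>
      match gm.get? p.2 with
      | none => d
      | some g => if counts.getD g 0 ≥ mi then d.modify g ([] : List Int) (· ++ [p.1]) else d) d
    = ((pvPairs gm l).filter (fun q => counts.getD q.1 0 ≥ mi)).foldl
        (fun d q => d.modify q.1 ([] : List Int) (· ++ [q.2])) d := by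
  induction l generalizing d with
  | nil => rfl
  | cons p rest ih =>
    simp only [pvPairs, List.foldl_cons, List.filterMap_cons]
    cases h : gm.get? p.2 with
    | none => simp [ih, pvPairs]
    | some g =>
      by_cases hc : counts.getD g 0 ≥ mi <;> simp [hc, ih, pvPairs]

lemma pvFoldC (gm : PySem.Dict String String) (tn : List String) (c : PySem.Dict String Int) :
    tn.foldl (fun c name =>
      match gm.get? name with
      | none => c
      | some g => c.insert g (c.getD g 0 + 1)) c
    = (tn.filterMap gm.get?).foldl (fun c g => c.insert g (c.getD g 0 + 1)) c := by
  induction tn generalizing c with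
  | nil => rfl
  | cons n rest ih =>
    simp only [List.foldl_cons, List.filterMap_cons]
    cases h : gm.get? n <;> simp [ih]

lemma pvPairs_map_fst (gm : PySem.Dict String String) (l : List (Int × String)) :
    (pvPairs gm l).map (·.1) = (l.map (·.2)).filterMap gm.get? := by
  simp [pvPairs, List.map_filterMap, List.filterMap_map, Option.map_map, Function.comp_def]

lemma pvSet_ofList_filter (P : String → Bool) (xs : List String) :
    PySem.Set.ofList (xs.filter P) = (PySem.Set.ofList xs).filter P := by
  induction xs using List.reverseRecOn with
  | nil => rfl
  | append_singleton xs x ih =>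
    rw [List.filter_append, PySem.Set.ofList_append_singleton]
    by_cases hp : P x = true
    · simp only [List.filter_cons, hp, if_pos, List.filter_nil,
        PySem.Set.ofList_append_singleton, ih]
      rw [PySem.Set.add_eq_ite, PySem.Set.add_eq_ite]
      by_cases hx : x ∈ PySem.Set.ofList xs
      · simp [hx, List.mem_filter, hp]
      · simp [hx, List.mem_filter, List.filter_append, hp]
    · simp only [List.filter_cons, hp, if_neg, Bool.false_eq_true, not_false_iff,
        List.filter_nil, List.append_nil, ih]
      rw [PySem.Set.add_eq_ite]
      by_cases hx : x ∈ PySem.Set.ofList xs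
      · simp [hx]
      · simp [hx, List.filter_append, hp]

lemma pvGrp_keys (l : List (String × Int)) :
    (pvGrp l).keys = PySem.Set.ofList (l.map (·.1)) := by
  rw [pvGrp, PySem.Dict.keys_foldl_modify_key (key := Prod.fst)
      (f := fun _ q => (· ++ [q.2])) (d0 := ([] : List Int))]
  simp [PySem.Set.update_nil_left]

lemma pvGrp_keys_nodup (l : List (String × Int)) : (pvGrp l).keys.Nodup := by
  rw [pvGrp_keys]; exact PySem.Set.nodup_ofList _

lemma pvGrp_getD (l : List (String × Int)) (k : String) :
    (pvGrp l).getD k ([] : List Int) = (l.filter (fun q => q.1 == k)).map (·.2) := by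
  rw [pvGrp, PySem.Dict.getD_foldl_modify_append]
  simp

lemma pvGrp_items (l : List (String × Int)) :
    (pvGrp l).items
    = (PySem.Set.ofList (l.map (·.1))).map
        (fun k => (k, (l.filter (fun q => q.1 == k)).map (·.2))) := by
  rw [PySem.Dict.items_eq_map_keys _ (pvGrp_keys_nodup l) ([] : List Int), pvGrp_keys]
  exact List.map_congr_left (fun k _ => by rw [pvGrp_getD])

-- the core commutation: grouping the key-filtered pairs = filtering the grouped items by key
-- the core commutation: grouping the key-filtered pairs = filtering the grouped items by key
lemma pvGrp_filter (l : List (String × Int)) (P : String → Bool) :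
    (pvGrp (l.filter (fun q => P q.1))).items = (pvGrp l).items.filter (fun p => P p.1) := by
  have h1 : (l.filter (fun q => P q.1)).map (·.1) = (l.map (·.1)).filter P := by
    simp [List.filter_map, Function.comp_def]
  rw [pvGrp_items, pvGrp_items, List.filter_map, h1, pvSet_ofList_filter]
  simp only [Function.comp_def]
  apply List.map_congr_left
  intro k hk
  have hPk : P k = true := (List.mem_filter.mp hk).2
  congr 1
  rw [List.filter_filter]
  refine congrArg _ (List.filter_congr ?_)
  intro q _
  by_cases h : q.1 = k
  · simp [h, hPk]
  · simp [h]

lemma pvCount_filter_length (l : List (String × Int)) (k : String) :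
    (l.filter (fun q => q.1 == k)).length = (l.map (·.1)).count k := by
  rw [List.count_eq_countP, List.countP_map, List.countP_eq_length_filter]
  simp [Function.comp_def]

theorem pv_main (tn : List String) (gm : PySem.Dict String String) (mi : Int) :
    (pvGrp (pvPairs gm (PySem.List.enumerate tn 0))).items.filter (fun p => (p.2.length : Int) ≥ mi)
      = (pvGrp ((pvPairs gm (PySem.List.enumerate tn 0)).filter
          (fun q => (pvB_counts gm tn).getD q.1 0 ≥ mi))).items := by
  set l := pvPairs gm (PySem.List.enumerate tn 0) with hl
  have hcnt : ∀ g, (pvB_counts gm tn).getD g 0 = ((tn.filterMap gm.get?).count g : Int) := by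
    intro g
    rw [pvB_counts, pvFoldC, PySem.Dict.getD_foldl_insert_add_one]
    simp
  have hgen : l.map (·.1) = tn.filterMap gm.get? := by
    rw [hl, pvPairs_map_fst, PySem.List.map_snd_enumerate]
  have h := pvGrp_filter l (fun g => decide ((pvB_counts gm tn).getD g 0 ≥ mi))
  beta_reduce at h
  rw [h]
  -- both sides filter (pvGrp l).items; show the predicates agree on its members
  apply List.filter_congr
  intro p hp
  rw [pvGrp_items] at hp
  rcases List.mem_map.mp hp with ⟨k, _, rfl⟩
  simp only [decide_eq_decide]
  rw [List.length_map, pvCount_filter_length, hcnt, hgen]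

-- ===== VERDICT (by name: the statement is the Claim_ definition above) =====
theorem build_gene_groups_spec : Claim_equal_build_gene_groups := by
  intro tn gmL mi _
  show build_gene_groups tn gmL mi = build_gene_groups_alt tn gmL mi
  rw [build_gene_groups, build_gene_groups_alt, pvA_groups, pvB_result, pvFoldA, pvFoldB]
  exact pv_main tn (PySem.Dict.ofList gmL) mi
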